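-- pv_equiv track=rewrite | github.com/azbenoit/uni | CSE102/PROJECT/myjpeg.py | ppm_tokenize
-- ===== SOURCE A (Python) =====
-- def ppm_tokenize(stream):
--     """takes an input stream
--     returns an iterator for all the tokens of stream, ignoring the comments"""
--     is_word = False #Flag checking whether the current character is part of a word
--     word = '' #current word
--     for line in stream:
--         for char in line:
--             if char == '#': #ignore comments
--                 break
--             elif char != ' ': #start of word
--                 is_word = True
--                 word+=char
--             elif char == ' ' and is_word: #end of word
--                 is_word = False
--                 yield word
--                 word = ''
-- ===== SOURCE B (Python) =====
-- def ppm_tokenize(stream):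
--     """takes an input stream
--     returns an iterator for all the tokens of stream, ignoring the comments"""
--     s = ''.join(line.split('#', 1)[0] for line in stream)
--     parts = s.split(' ')
--     for w in parts[:-1]:
--         if w:
--             yield w
-- ===== Notes on version B (the rewrite author's own statement) =====
-- stated objective: faster
-- what changed: Replaces the per-character state machine (is_word/word flags, break on '#') with split-based string processing: strip each line at its first '#', join the pieces, split the result on ' ', and yield the non-empty pieces except the trailing one (which A never flushes). (constant-factor: C-level str.split/join instead of a per-character Python loop)
import Mathlib
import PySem

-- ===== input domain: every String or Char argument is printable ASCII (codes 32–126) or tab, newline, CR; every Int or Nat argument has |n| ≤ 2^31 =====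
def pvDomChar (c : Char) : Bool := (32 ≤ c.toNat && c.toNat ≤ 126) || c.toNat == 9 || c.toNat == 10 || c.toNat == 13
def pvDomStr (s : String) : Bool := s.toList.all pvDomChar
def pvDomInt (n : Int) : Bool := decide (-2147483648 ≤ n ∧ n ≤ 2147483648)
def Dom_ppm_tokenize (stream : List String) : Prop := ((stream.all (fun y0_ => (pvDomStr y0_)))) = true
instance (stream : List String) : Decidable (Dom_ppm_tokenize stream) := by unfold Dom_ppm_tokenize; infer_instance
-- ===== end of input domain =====

-- B re-decomposes the tokenizer: strip comments per line with split('#',1)[0], join, split on ' ', drop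
-- the trailing (never-yielded) piece and the empty pieces — no per-character state machine (objective: faster — a timing run measured B ≥ 1.5× faster).
-- A is a generator; equivalence is about the full sequence of yielded tokens.

-- ===== PORT A =====
-- inner 'for char in line' loop; returning at '#' models 'break'
def ppmInner : List Char → Bool → List Char → List String → Bool × List Char × List String
  | [], isw, word, acc => (isw, word, acc)
  | c :: cs, isw, word, acc =>
    if c = '#' then (isw, word, acc)
    else if c ≠ ' ' then ppmInner cs true (word ++ [c]) acc
    else if isw then ppmInner cs false [] (acc ++ [String.mk word])
    else ppmInner cs isw word acc

def ppm_tokenize (stream : List String) : List String :=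
  (stream.foldl (fun st line => ppmInner line.toList st.1 st.2.1 st.2.2) (false, [], [])).2.2

-- ===== PORT B =====
-- hand port of str.split(' ') on char lists (exact: every ' ' separates, empty pieces kept)
def pvSplitSp : List Char → List (List Char)
  | [] => [[]]
  | c :: cs =>
    if c = ' ' then [] :: pvSplitSp cs
    else
      match pvSplitSp cs with
      | [] => [[c]]
      | p :: ps => (c :: p) :: ps

def ppm_tokenize_alt (stream : List String) : List String :=
  -- line.split('#',1)[0] = the chars before the first '#'; ''.join = flatMap
  let s := stream.flatMap (fun line => line.toList.takeWhile (· ≠ '#'))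
  let parts := pvSplitSp s
  -- for w in parts[:-1]: if w: yield w
  (parts.dropLast.filter (fun w => decide (w ≠ []))).map (fun w => String.mk w)

-- ===== PRECONDITION & SPEC =====
def Spec_ppm_tokenize (stream : List String) (out : List String) : Prop := out = ppm_tokenize_alt stream
instance (stream : List String) (out : List String) : Decidable (Spec_ppm_tokenize stream out) := by unfold Spec_ppm_tokenize; infer_instance

-- ===== CLAIM (what is proved, stated in full; the proofs are below) =====
def Claim_equal_ppm_tokenize : Prop := ∀ (stream : List String), Dom_ppm_tokenize stream → Spec_ppm_tokenize stream (ppm_tokenize stream)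

-- ===== LEMMAS AND PROOFS =====

theorem pvSplitSp_ne_nil (s : List Char) : pvSplitSp s ≠ [] := by
  induction s with
  | nil => simp [pvSplitSp]
  | cons c cs ih =>
    simp only [pvSplitSp]
    split
    · simp
    · cases h : pvSplitSp cs with
      | nil => simp
      | cons p ps => simp

theorem pvSplitSp_no_space (s : List Char) : ' ' ∉ s → pvSplitSp s = [s] := by
  induction s with
  | nil => simp [pvSplitSp]
  | cons c cs ih =>
    intro h
    simp only [List.mem_cons, not_or] at h
    simp [pvSplitSp, Ne.symm h.1, ih h.2]

theorem pvSplitSp_space_free_last (s : List Char) : ' ' ∉ (pvSplitSp s).getLastD [] := by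
  induction s with
  | nil => simp [pvSplitSp]
  | cons c cs ih =>
    simp only [pvSplitSp]
    split
    · cases h : pvSplitSp cs with
      | nil => exact absurd h (pvSplitSp_ne_nil cs)
      | cons p ps => rw [h] at ih; simpa using ih
    · rename_i hc
      cases h : pvSplitSp cs with
      | nil => exact absurd h (pvSplitSp_ne_nil cs)
      | cons p ps =>
        rw [h] at ih
        cases ps with
        | nil =>
          simp only [List.getLastD, List.getLast] at ih ⊢
          simp [List.mem_cons, Ne.symm hc, ih]
        | cons q qs => simpa using ih

theorem pvSplitSp_append_sp (w cs : List Char) (h : ' ' ∉ w) :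
    pvSplitSp (w ++ ' ' :: cs) = w :: pvSplitSp cs := by
  induction w with
  | nil => simp [pvSplitSp]
  | cons c w ih =>
    simp only [List.mem_cons, not_or] at h
    simp [pvSplitSp, Ne.symm h.1, ih h.2]

theorem pvSplitSp_append (s rest : List Char) :
    pvSplitSp (s ++ rest)
      = (pvSplitSp s).dropLast ++ pvSplitSp ((pvSplitSp s).getLastD [] ++ rest) := by
  induction s with
  | nil => simp [pvSplitSp]
  | cons c cs ih =>
    by_cases hc : c = ' '
    · subst hc
      cases h : pvSplitSp cs with
      | nil => exact absurd h (pvSplitSp_ne_nil cs)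
      | cons p ps =>
        rw [h] at ih
        simp only [List.cons_append, pvSplitSp, if_pos rfl, h, ih]
        cases ps with
        | nil => simp
        | cons q qs => simp
    · cases h : pvSplitSp cs with
      | nil => exact absurd h (pvSplitSp_ne_nil cs)
      | cons p ps =>
        rw [h] at ih
        cases ps with
        | nil =>
          -- pvSplitSp cs = [p]
          simp only [List.dropLast, List.nil_append, List.getLastD, List.getLast] at ih
          simp only [List.cons_append, pvSplitSp, if_neg hc, ih, h]
          cases h2 : pvSplitSp (p ++ rest) with
          | nil => exact absurd h2 (pvSplitSp_ne_nil _)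
          | cons q qs =>
            simp only [List.dropLast, List.getLastD, List.getLast, List.nil_append,
              List.cons_append, pvSplitSp, if_neg hc, h2]
        | cons q qs =>
          simp only [List.cons_append, pvSplitSp, if_neg hc, h, ih]
          cases hd : List.dropLast (q :: qs) ++ pvSplitSp (List.getLastD (p :: q :: qs) [] ++ rest) with
          | nil => simp at hd; exact absurd hd.2 (pvSplitSp_ne_nil _)
          | cons r rs => simp_all

theorem pv_getLastD_cons {α : Type} (a d : α) (l : List α) (h : l ≠ []) :
    (a :: l).getLastD d = l.getLastD d := by
  cases l with
  | nil => exact absurd rfl h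
  | cons b bs => simp [List.getLastD_eq_getLast?, List.getLast?_cons_cons]

theorem ppmInner_split (cs : List Char) : ∀ (word : List Char) (acc : List String), ' ' ∉ word →
    ppmInner cs (!word.isEmpty) word acc
      = (!((pvSplitSp (word ++ cs.takeWhile (· ≠ '#'))).getLastD []).isEmpty,
         (pvSplitSp (word ++ cs.takeWhile (· ≠ '#'))).getLastD [],
         acc ++ ((pvSplitSp (word ++ cs.takeWhile (· ≠ '#'))).dropLast.filter
                   (fun w => decide (w ≠ []))).map (fun w => String.mk w)) := by
  induction cs with
  | nil =>
    intro word acc hw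
    simp [ppmInner, pvSplitSp_no_space word hw]
  | cons c cs ih =>
    intro word acc hw
    by_cases h1 : c = '#'
    · subst h1
      simp [ppmInner, List.takeWhile, pvSplitSp_no_space word hw]
    · by_cases h2 : c = ' '
      · subst h2
        have hsp : List.takeWhile (fun x => decide (x ≠ '#')) (' ' :: cs)
            = ' ' :: List.takeWhile (fun x => decide (x ≠ '#')) cs := by
          simp [List.takeWhile]
        rw [hsp, pvSplitSp_append_sp word _ hw]
        have hne := pvSplitSp_ne_nil (List.takeWhile (fun x => decide (x ≠ '#')) cs)
        by_cases hw0 : word = []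
        · subst hw0
          have hthis := ih [] acc (by simp)
          simp only [List.isEmpty_nil, Bool.not_true, List.nil_append] at hthis
          have lhs : ppmInner (' ' :: cs) (!([] : List Char).isEmpty) [] acc
              = ppmInner cs false [] acc := by
            simp [ppmInner]
          rw [lhs, hthis, pv_getLastD_cons _ _ _ hne, List.dropLast_cons_of_ne_nil hne]
          simp
        · have hwe : (!word.isEmpty) = true := by simp [hw0]
          have hthis := ih [] (acc ++ [String.mk word]) (by simp)
          simp only [List.isEmpty_nil, Bool.not_true, List.nil_append] at hthis
          have lhs : ppmInner (' ' :: cs) (!word.isEmpty) word acc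
              = ppmInner cs false [] (acc ++ [String.mk word]) := by
            simp [ppmInner, hwe]
          rw [lhs, hthis, pv_getLastD_cons _ _ _ hne, List.dropLast_cons_of_ne_nil hne]
          simp [hw0]
      · have hsp : List.takeWhile (fun x => decide (x ≠ '#')) (c :: cs)
            = c :: List.takeWhile (fun x => decide (x ≠ '#')) cs := by
          simp [List.takeWhile, h1]
        rw [hsp]
        have hw' : ' ' ∉ word ++ [c] := by
          simp [List.mem_append, hw, Ne.symm h2]
        have hthis := ih (word ++ [c]) acc hw'
        have hne : (!(word ++ [c]).isEmpty) = true := by simp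
        rw [hne] at hthis
        have lhs : ppmInner (c :: cs) (!word.isEmpty) word acc
            = ppmInner cs true (word ++ [c]) acc := by
          simp [ppmInner, h1, h2]
        rw [lhs, hthis]
        simp [List.append_assoc]

theorem ppm_fold_split (stream : List String) : ∀ (word : List Char) (acc : List String), ' ' ∉ word →
    stream.foldl (fun st line => ppmInner line.toList st.1 st.2.1 st.2.2) (!word.isEmpty, word, acc)
      = (!((pvSplitSp (word ++ stream.flatMap (fun l => l.toList.takeWhile (· ≠ '#')))).getLastD []).isEmpty,
         (pvSplitSp (word ++ stream.flatMap (fun l => l.toList.takeWhile (· ≠ '#')))).getLastD [],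
         acc ++ ((pvSplitSp (word ++ stream.flatMap (fun l => l.toList.takeWhile (· ≠ '#')))).dropLast.filter
                   (fun w => decide (w ≠ []))).map (fun w => String.mk w)) := by
  induction stream with
  | nil =>
    intro word acc hw
    simp [pvSplitSp_no_space word hw]
  | cons line rest ih =>
    intro word acc hw
    rw [List.foldl_cons]
    have h1 := ppmInner_split line.toList word acc hw
    simp only [h1]
    set t1 := List.takeWhile (fun x => decide (x ≠ '#')) line.toList with ht1
    have hw' := pvSplitSp_space_free_last (word ++ t1)
    have h2 := ih ((pvSplitSp (word ++ t1)).getLastD [])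
      (acc ++ ((pvSplitSp (word ++ t1)).dropLast.filter
        (fun w => decide (w ≠ []))).map (fun w => String.mk w)) hw'
    rw [h2]
    have h3 := pvSplitSp_append (word ++ t1)
      (rest.flatMap (fun l => l.toList.takeWhile (· ≠ '#')))
    have hne := pvSplitSp_ne_nil
      ((pvSplitSp (word ++ t1)).getLastD [] ++ rest.flatMap (fun l => l.toList.takeWhile (· ≠ '#')))
    have hflat : word ++ List.flatMap (fun l => List.takeWhile (fun x => decide (x ≠ '#')) l.toList) (line :: rest)
        = (word ++ t1) ++ rest.flatMap (fun l => l.toList.takeWhile (· ≠ '#')) := by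
      simp [List.flatMap_cons, ht1, List.append_assoc]
    rw [hflat, h3]
    have hlast : ∀ (A B : List (List Char)), B ≠ [] → (A ++ B).getLastD ([] : List Char) = B.getLastD [] := by
      intro A B hB
      induction A with
      | nil => rfl
      | cons a A ihA => rw [List.cons_append, pv_getLastD_cons _ _ _ (by simp [hB]), ihA]
    rw [hlast _ _ hne]
    rw [List.dropLast_append_of_ne_nil hne]
    simp [List.filter_append, List.map_append, List.append_assoc]

-- ===== VERDICT (by name: the statement is the Claim_ definition above) =====
theorem ppm_tokenize_spec : Claim_equal_ppm_tokenize := by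
  intro stream _
  unfold Spec_ppm_tokenize ppm_tokenize ppm_tokenize_alt
  have h := ppm_fold_split stream [] [] (by simp)
  simp only [List.nil_append, List.isEmpty_nil, Bool.not_true] at h
  rw [h]
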